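-- pv_equiv track=rewrite | github.com/delandcaglar/udentify | bot_udentify/request1.py | list_to_string_ve_ile
-- ===== SOURCE A (Python) =====
-- def list_to_string_ve_ile(s):
--     # Output Ornegi: 5 UHD-LCD TV PALET , 131 YER BAKIM URUNLERI , 142 CAMASIR MAKINELERI ve Kasa
--     # initialize an empty string
--     son_part = s[-1:]
--     s = s[:-1]
--     str1 = " "
--     str2 = " "
--     ilk_liste = [x for y in (s[i:i + 1] + [','] * (i < len ( s ) - 1) for i in range ( 0, len ( s ), 1 )) for x in y]
--     ikici_liste = [x for y in (son_part[i:i + 1] + [','] * (i < len ( son_part ) - 1) for i in range ( 0, len ( son_part ), 1 )) for x in y]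
--     final_form2 = (str2.join ( ikici_liste ))
--     final_form = (str1.join ( ilk_liste ))
--     final_form1 = f"{final_form} ve {(final_form2)}"
--     if final_form == "":
--         final_form1 = f"{(final_form2)}"
--
--     return final_form1
-- ===== SOURCE B (Python) =====
-- def list_to_string_ve_ile(s):
--     prefix = " , ".join(s[:-1])
--     last = s[-1] if s else ""
--     return last if prefix == "" else f"{prefix} ve {last}"
-- ===== Notes on version B (the rewrite author's own statement) =====
-- stated objective: simpler
-- what changed: B replaces A's build-interleaved-comma-list-then-flatten-then-space-join construction with a single ' , '.join over all but the last element plus one conditional format string.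
import Mathlib
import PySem

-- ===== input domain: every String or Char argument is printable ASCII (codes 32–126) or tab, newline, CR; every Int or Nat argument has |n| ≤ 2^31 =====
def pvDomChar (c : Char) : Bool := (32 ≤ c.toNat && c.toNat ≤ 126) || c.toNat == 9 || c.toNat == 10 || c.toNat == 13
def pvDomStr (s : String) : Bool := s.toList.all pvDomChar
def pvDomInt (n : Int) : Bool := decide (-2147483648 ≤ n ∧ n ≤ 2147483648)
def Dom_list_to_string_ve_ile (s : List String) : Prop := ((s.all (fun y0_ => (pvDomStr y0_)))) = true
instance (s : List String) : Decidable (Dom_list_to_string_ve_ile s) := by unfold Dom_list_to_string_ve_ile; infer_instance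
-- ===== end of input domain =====

-- B replaces A's build-interleaved-comma-list-then-flatten-then-space-join construction with a
-- single " , ".join over all but the last element plus one conditional format string (simpler).

-- ===== PORT A =====
def list_to_string_ve_ile (s : List String) : String :=
  -- son_part = s[-1:] ; s = s[:-1]
  let son_part := PySem.List.slice s (some (-1)) none
  let s' := PySem.List.slice s none (some (-1))
  let str1 := " "
  let str2 := " "
  -- [x for y in (s[i:i+1] + [','] * (i < len(s) - 1) for i in range(0, len(s), 1)) for x in y]
  let ilk_liste := (PySem.List.pyRange 0 (s'.length : Int) 1).flatMap
      (fun i => PySem.List.slice s' (some i) (some (i + 1)) ++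
        (if i < (s'.length : Int) - 1 then [","] else []))
  let ikici_liste := (PySem.List.pyRange 0 (son_part.length : Int) 1).flatMap
      (fun i => PySem.List.slice son_part (some i) (some (i + 1)) ++
        (if i < (son_part.length : Int) - 1 then [","] else []))
  let final_form2 := PySem.Str.join str2 ikici_liste
  let final_form := PySem.Str.join str1 ilk_liste
  -- f"{final_form} ve {final_form2}"  (string concatenation, done on the char-list side)
  let final_form1 := String.ofList (final_form.toList ++ (" ve ").toList ++ final_form2.toList)
  if final_form = "" then final_form2 else final_form1

-- ===== PORT B =====
def list_to_string_ve_ile_alt (s : List String) : String :=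
  -- prefix = " , ".join(s[:-1])
  let prefix_ := PySem.Str.join " , " (PySem.List.slice s none (some (-1)))
  -- last = s[-1] if s else ""
  let last := match s.getLast? with | some x => x | none => ""
  -- last if prefix == "" else f"{prefix} ve {last}"
  if prefix_ = "" then last
  else String.ofList (prefix_.toList ++ (" ve ").toList ++ last.toList)

-- ===== PRECONDITION & SPEC =====
def Spec_list_to_string_ve_ile (s : List String) (out : String) : Prop := out = list_to_string_ve_ile_alt s
instance (s : List String) (out : String) : Decidable (Spec_list_to_string_ve_ile s out) := by unfold Spec_list_to_string_ve_ile; infer_instance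

-- ===== CLAIM (what is proved, stated in full; the proofs are below) =====
def Claim_equal_list_to_string_ve_ile : Prop := ∀ (s : List String), Dom_list_to_string_ve_ile s → Spec_list_to_string_ve_ile s (list_to_string_ve_ile s)

-- ===== LEMMAS AND PROOFS =====

theorem pv_str_join_nil (sep : String) : PySem.Str.join sep [] = "" := by
  apply String.toList_inj.mp
  rw [PySem.Str.toList_join]
  simp [PySem.Chars.join_nil]

theorem pv_str_join_singleton (sep x : String) : PySem.Str.join sep [x] = x := by
  apply String.toList_inj.mp
  rw [PySem.Str.toList_join]
  simp [PySem.Chars.join_singleton]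

theorem pv_map_intersperse {a b : Type} (f : a -> b) (sep : a) (xs : List a) :
    List.map f (List.intersperse sep xs) = List.intersperse (f sep) (List.map f xs) := by
  induction xs with
  | nil => simp
  | cons x t ih =>
    cases t with
    | nil => simp [List.intersperse]
    | cons y tt => simp_all [List.intersperse]

-- A's comprehension builds xs interspersed with "," : shown for a general window pre ++ xs of l.
theorem pv_interleave_aux (xs : List String) (l pre : List String) (h : l = pre ++ xs) :
    (PySem.List.pyRange (pre.length : Int) (l.length : Int) 1).flatMap
      (fun i => PySem.List.slice l (some i) (some (i + 1)) ++
        (if i < (l.length : Int) - 1 then [","] else []))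
    = List.intersperse "," xs := by
  induction xs generalizing pre with
  | nil =>
    subst h
    simp [PySem.List.pyRange_one_eq_nil]
  | cons x t ih =>
    have hlen : l.length = pre.length + 1 + t.length := by subst h; simp; omega
    have hlt : (pre.length : Int) < (l.length : Int) := by
      have : pre.length < l.length := by omega
      exact_mod_cast this
    rw [PySem.List.pyRange_one_cons hlt, List.flatMap_cons]
    have hslice : PySem.List.slice l (some (pre.length : Int)) (some ((pre.length : Int) + 1)) = [x] := by
      have h1 : ((pre.length : Int) + 1) = ((pre.length : Nat) : Int) + ((1 : Nat) : Int) := by norm_cast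
      rw [h1, PySem.List.slice_natCast_add]
      subst h
      simp
    have htail : (PySem.List.pyRange ((pre.length : Int) + 1) (l.length : Int) 1).flatMap
        (fun i => PySem.List.slice l (some i) (some (i + 1)) ++
          (if i < (l.length : Int) - 1 then [","] else []))
        = List.intersperse "," t := by
      have h2 : ((pre.length : Int) + 1) = ((pre ++ [x]).length : Int) := by simp
      rw [h2]
      exact ih (pre ++ [x]) (by simp [h])
    rw [htail, hslice]
    cases t with
    | nil =>
      have h0 : l.length = pre.length + 1 := by simpa using hlen
      have : ¬ ((pre.length : Int) < (l.length : Int) - 1) := by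
        rw [h0]; push_cast; omega
      simp [this, List.intersperse]
    | cons y tt =>
      have h0 : l.length = pre.length + 1 + (tt.length + 1) := by simpa using hlen
      have : (pre.length : Int) < (l.length : Int) - 1 := by
        rw [h0]; push_cast; omega
      simp [this, List.intersperse]

-- joining with " " a ","-interspersed list is joining with " , "
theorem pv_chars_join_intersperse (ps : List (List Char)) :
    PySem.Chars.join [' '] (List.intersperse [','] ps) = PySem.Chars.join [' ', ',', ' '] ps := by
  induction ps with
  | nil => simp [PySem.Chars.join_nil]
  | cons p tail ih =>
    cases tail with
    | nil => simp [List.intersperse, PySem.Chars.join_singleton]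
    | cons q rest =>
      have hint : List.intersperse [','] (p :: q :: rest)
          = p :: [','] :: List.intersperse [','] (q :: rest) := by
        simp [List.intersperse]
      rw [hint]
      rcases e : List.intersperse [','] (q :: rest) with _ | ⟨z, zs⟩
      · exfalso; cases rest <;> simp [List.intersperse] at e
      · rw [e] at ih
        rw [PySem.Chars.join_cons_cons, PySem.Chars.join_cons_cons, ih,
          PySem.Chars.join_cons_cons]
        simp

theorem pv_join_space_intersperse (xs : List String) :
    PySem.Str.join " " (List.intersperse "," xs) = PySem.Str.join " , " xs := by
  apply String.toList_inj.mp
  rw [PySem.Str.toList_join, PySem.Str.toList_join, pv_map_intersperse]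
  have h1 : (" " : String).toList = [' '] := by decide
  have h2 : (" , " : String).toList = [' ', ',', ' '] := by decide
  have h3 : ("," : String).toList = [','] := by decide
  rw [h1, h2, h3]
  exact pv_chars_join_intersperse (xs.map String.toList)

-- ===== VERDICT (by name: the statement is the Claim_ definition above) =====
theorem list_to_string_ve_ile_spec : Claim_equal_list_to_string_ve_ile := by
  intro s _
  unfold Spec_list_to_string_ve_ile list_to_string_ve_ile list_to_string_ve_ile_alt
  simp only []
  -- the prefix join
  have hpre : PySem.Str.join " "
      ((PySem.List.pyRange 0 (((PySem.List.slice s none (some (-1))).length : Int)) 1).flatMap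
        (fun i => PySem.List.slice (PySem.List.slice s none (some (-1))) (some i) (some (i + 1)) ++
          (if i < ((PySem.List.slice s none (some (-1))).length : Int) - 1 then [","] else [])))
      = PySem.Str.join " , " (PySem.List.slice s none (some (-1))) := by
    rw [show (0 : Int) = ((([] : List String)).length : Int) by simp,
      pv_interleave_aux (PySem.List.slice s none (some (-1))) _ [] (by simp),
      pv_join_space_intersperse]
  -- the last-element join
  have hson : PySem.Str.join " "
      ((PySem.List.pyRange 0 (((PySem.List.slice s (some (-1)) none).length : Int)) 1).flatMap
        (fun i => PySem.List.slice (PySem.List.slice s (some (-1)) none) (some i) (some (i + 1)) ++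
          (if i < ((PySem.List.slice s (some (-1)) none).length : Int) - 1 then [","] else [])))
      = (match s.getLast? with | some x => x | none => "") := by
    rw [show (0 : Int) = ((([] : List String)).length : Int) by simp,
      pv_interleave_aux (PySem.List.slice s (some (-1)) none) _ [] (by simp)]
    rw [PySem.List.slice_from_neg_one]
    cases hlast : s.getLast? with
    | none =>
      have : s = [] := List.getLast?_eq_none_iff.mp hlast
      subst this
      simp [pv_str_join_nil]
    | some x =>
      have hne : s ≠ [] := by intro h; subst h; simp at hlast
      have hd : s.drop (s.length - 1) = [x] := by
        have := List.drop_length_sub_one hne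
        have hg : s.getLast hne = x := by
          have h2 := List.getLast?_eq_some_getLast (l := s) hne
          rw [hlast] at h2
          exact (Option.some_injective _ h2).symm
        rw [this, hg]
      rw [hd]
      simp [List.intersperse, pv_str_join_singleton]
  rw [hpre, hson]
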